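-- pv_equiv track=rewrite | github.com/DANKnespl/TUL_BS-MT | cv12/cv12.py | bcd2gray
-- ===== SOURCE A (Python) =====
-- def bcd2gray(binary):
--     """
--     Function to transform BCD string to Gray string
--     """
--     last_value = 0
--     gray=""
--     for _,value in enumerate(binary):
--         if bool(last_value)^bool(int(value)):
--             gray+="1"
--         else:
--             gray+="0"
--         last_value=int(value)
--     return gray
-- ===== SOURCE B (Python) =====
-- def bcd2gray(binary):
--     """
--     Function to transform BCD string to Gray string
--     """
--     if not binary:
--         return ""
--     n = 0
--     for value in binary:
--         n = (n << 1) | (1 if int(value) else 0)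
--     g = n ^ (n >> 1)
--     return format(g, "0%db" % len(binary))
-- ===== Notes on version B (the rewrite author's own statement) =====
-- stated objective: alternative
-- what changed: Replaces the per-character last_value XOR loop by the numeric Gray-code formula: pack the bits (int(c) truthiness) into one integer n, compute g = n ^ (n >> 1) in a single machine-level XOR, and zero-pad-format g back to a binary string.
import Mathlib
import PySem

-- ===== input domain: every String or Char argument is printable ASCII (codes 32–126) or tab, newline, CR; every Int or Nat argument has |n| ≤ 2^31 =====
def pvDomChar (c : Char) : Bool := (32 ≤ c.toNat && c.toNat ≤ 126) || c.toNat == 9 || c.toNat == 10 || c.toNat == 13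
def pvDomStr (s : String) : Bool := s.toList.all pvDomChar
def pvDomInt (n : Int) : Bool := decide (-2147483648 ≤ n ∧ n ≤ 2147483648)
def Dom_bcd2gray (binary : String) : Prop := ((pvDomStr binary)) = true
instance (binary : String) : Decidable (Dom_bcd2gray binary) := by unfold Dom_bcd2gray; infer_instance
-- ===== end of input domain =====

-- B replaces A's per-character XOR loop by the numeric Gray-code formula
-- g = n ^ (n >> 1) on the packed bit value, formatted back (objective: alternative).

-- int(c) for a single character c, as Python computes it (none = ValueError, excluded by Pre_;
-- the .getD 0 default is never reached inside Pre_).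
def pvIntOfChar (c : Char) : Int := (PySem.Int.ofStr? (String.mk [c])).getD 0

-- ===== PORT A =====
def bcd2gray (binary : String) : String :=
  -- for _, value in enumerate(binary): state = (last_value, gray)
  let r := binary.toList.foldl
    (fun (st : Int × List Char) value =>
      let v : Int := pvIntOfChar value
      let gray := if (decide (st.1 ≠ 0)) ^^ (decide (v ≠ 0))
                  then st.2 ++ ['1'] else st.2 ++ ['0']
      (v, gray))
    (0, [])
  String.mk r.2

-- ===== PORT B =====
-- 1 if int(value) else 0
def pvBit (c : Char) : Nat := if pvIntOfChar c ≠ 0 then 1 else 0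

-- format(g, "0%db" % w): w binary digits of g, most significant first (g < 2^w here)
def pvBinPad (g : Nat) : Nat → List Char
  | 0 => []
  | w + 1 => pvBinPad (g >>> 1) w ++ [if g % 2 = 1 then '1' else '0']

def bcd2gray_alt (binary : String) : String :=
  let bs := binary.toList
  if bs.isEmpty then ""
  else
    let n := bs.foldl (fun n c => 2 * n + pvBit c) 0   -- (n << 1) | bit, bit < 2
    let g := n ^^^ (n >>> 1)
    String.mk (pvBinPad g bs.length)

-- ===== PRECONDITION & SPEC =====
-- Pre_ excludes exactly the inputs with a non-digit character, where Python's int(value) raises ValueError.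
def Pre_bcd2gray (binary : String) : Prop := binary.toList.all PySem.Chars.isdigit = true
instance (binary : String) : Decidable (Pre_bcd2gray binary) := by unfold Pre_bcd2gray; infer_instance
def pvWitness_bcd2gray : String := "1011"

def Spec_bcd2gray (binary : String) (out : String) : Prop := out = bcd2gray_alt binary
instance (binary : String) (out : String) : Decidable (Spec_bcd2gray binary out) := by unfold Spec_bcd2gray; infer_instance

-- ===== CLAIM (what is proved, stated in full; the proofs are below) =====
def Claim_equal_bcd2gray : Prop := ∀ (binary : String), Dom_bcd2gray binary → Pre_bcd2gray binary → Spec_bcd2gray binary (bcd2gray binary)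

-- ===== LEMMAS AND PROOFS =====

-- one emitted bit of A for the consecutive pair (prev, cur)
def pvEmit (p c : Char) : Char :=
  if (decide (pvIntOfChar p ≠ 0)) ^^ (decide (pvIntOfChar c ≠ 0)) then '1' else '0'

-- A's whole output as a prev-carrying recursion
def pvPairs : Char → List Char → List Char
  | _, [] => []
  | p, c :: t => pvEmit p c :: pvPairs c t

-- A's loop, started after previous character p with accumulated output acc
theorem bcd2gray_fold_eq (l : List Char) : ∀ (p : Char) (acc : List Char),
    (l.foldl
      (fun (st : Int × List Char) value =>
        let v : Int := pvIntOfChar value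
        let gray := if (decide (st.1 ≠ 0)) ^^ (decide (v ≠ 0))
                    then st.2 ++ ['1'] else st.2 ++ ['0']
        (v, gray))
      (pvIntOfChar p, acc)).2 = acc ++ pvPairs p l := by
  induction l with
  | nil => intro p acc; simp [pvPairs]
  | cons c t ih =>
      intro p acc
      simp only [List.foldl_cons, pvPairs, pvEmit]
      split_ifs with h
      · simpa using ih c (acc ++ ['1'])
      · simpa using ih c (acc ++ ['0'])

theorem pvPairs_snoc (l : List Char) : ∀ (p c : Char),
    pvPairs p (l ++ [c]) = pvPairs p l ++ [pvEmit (l.getLastD p) c] := by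
  induction l with
  | nil => intro p c; simp [pvPairs]
  | cons a t ih =>
      intro p c
      show pvEmit p a :: pvPairs a (t ++ [c]) = (pvEmit p a :: pvPairs a t) ++ _
      rw [ih]
      cases t <;> simp [List.getLastD]

theorem pvEmit_bit (p c : Char) :
    pvEmit p c = if (pvBit p + pvBit c) % 2 = 1 then '1' else '0' := by
  unfold pvEmit pvBit
  by_cases hp : pvIntOfChar p ≠ 0 <;> by_cases hc : pvIntOfChar c ≠ 0 <;>
    simp [hp, hc]

-- the packed value of a list of characters
def pvVal (l : List Char) : Nat := l.foldl (fun n c => 2 * n + pvBit c) 0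

theorem pvVal_snoc (l : List Char) (c : Char) :
    pvVal (l ++ [c]) = 2 * pvVal l + pvBit c := by
  simp [pvVal, List.foldl_append]

theorem pvBit_lt_two (c : Char) : pvBit c < 2 := by
  unfold pvBit; split <;> omega

-- main invariant: B's formatted Gray value is A's pairwise output,
-- and the low bit of the packed value is the last character's bit
theorem pvMain (l : List Char) :
    pvBinPad (pvVal l ^^^ (pvVal l >>> 1)) l.length = pvPairs '0' l ∧
    pvVal l % 2 = pvBit (l.getLastD '0') := by
  induction l using List.reverseRecOn with
  | nil => exact ⟨rfl, by decide⟩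
  | append_singleton l c ih =>
      obtain ⟨ih1, ih2⟩ := ih
      have hb := pvBit_lt_two c
      have hn' : pvVal (l ++ [c]) = 2 * pvVal l + pvBit c := pvVal_snoc l c
      have hshift : pvVal (l ++ [c]) >>> 1 = pvVal l := by
        rw [hn', Nat.shiftRight_one]; omega
      set n := pvVal l with hn
      set n' := pvVal (l ++ [c]) with hndef
      have hlen : (l ++ [c]).length = l.length + 1 := by simp
      constructor
      · rw [hlen, hshift]
        show pvBinPad ((n' ^^^ n) >>> 1) l.length ++
              [if (n' ^^^ n) % 2 = 1 then '1' else '0'] = pvPairs '0' (l ++ [c])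
        have hdist : (n' ^^^ n) >>> 1 = (n' >>> 1) ^^^ (n >>> 1) :=
          Nat.shiftRight_xor_distrib
        have hlow : (n' ^^^ n) % 2 = (pvBit (l.getLastD '0') + pvBit c) % 2 := by
          rw [Nat.xor_mod_two_eq]
          have hc2 : n' % 2 = pvBit c := by rw [hn']; omega
          omega
        rw [hdist, hshift, pvPairs_snoc, ih1, hlow, pvEmit_bit]
      · rw [hn']; simp; omega

-- ===== VERDICT (by name: the statement is the Claim_ definition above) =====
theorem bcd2gray_spec : Claim_equal_bcd2gray := by
  intro binary _ _
  show bcd2gray binary = bcd2gray_alt binary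
  simp only [bcd2gray, bcd2gray_alt]
  rw [show ((0:Int), ([]:List Char)) = (pvIntOfChar '0', ([]:List Char)) from by decide,
      bcd2gray_fold_eq]
  cases h : binary.toList with
  | nil => rfl
  | cons a t =>
      simp only [List.isEmpty_cons, if_neg Bool.false_ne_true]
      rw [show (a :: t).foldl (fun n c => 2 * n + pvBit c) 0 = pvVal (a :: t) from rfl,
          (pvMain (a :: t)).1]
      simp
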